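-- pv_equiv track=rewrite | github.com/sertman1/IR-WA-HW3 | k_nearest_classifier.py | get_ertman_weighting_weights
-- ===== SOURCE A (Python) =====
-- def get_uniform_weights(sentence):
--     weightings = [1] * len(sentence)
--     return weightings
--
-- def get_ertman_weighting_weights(sentence):
--     weightings = []
--     pos_ambigious = get_index_of_ambigious_word(sentence)
--
--     if pos_ambigious == -1:
--         return get_uniform_weights(sentence)
--
--     i = 0
--     while i < len(sentence):
--         dist = abs(pos_ambigious - i)
--
--         if dist == 0:
--             weightings.append(0)
--         elif dist == 1: # adjacent
--             weightings.append(11)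
--         elif dist == 2:
--             weightings.append(10)
--         elif dist == 3:
--             weightings.append(8)
--         elif dist == 4:
--             weightings.append(5)
--         elif dist == 5:
--             weightings.append(1)
--         else:
--             weightings.append(1)
--
--         i += 1
--
--     return weightings
--
-- def get_index_of_ambigious_word(sentence):
--     i = 0
--     for word in sentence:
--         if len(word) > 3 and word[0] == "." and word [1] == "X" and word[2] == "-":
--             return i
--         i += 1
--     return -1
-- ===== SOURCE B (Python) =====
-- def get_ertman_weighting_weights(sentence):
--     n = len(sentence)
--     pos = -1
--     for i in range(n):
--         w = sentence[i]
--         if len(w) > 3 and w[:3] == ".X-":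
--             pos = i
--             break
--     if pos == -1:
--         return [1] * n
--     ramp = [11, 10, 8, 5] + [1] * n
--     return ramp[:pos][::-1] + [0] + ramp[:n - 1 - pos]
-- ===== Notes on version B (the rewrite author's own statement) =====
-- stated objective: alternative
-- what changed: Instead of computing a distance and selecting a weight per element, B builds the whole output at once from a padded descending ramp [11,10,8,5,1,1,...]: the answer is reversed(ramp[:pos]) + [0] + ramp[:n-1-pos], i.e. two slices of one precomputed pattern mirrored around the ambiguous word.
import Mathlib
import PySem

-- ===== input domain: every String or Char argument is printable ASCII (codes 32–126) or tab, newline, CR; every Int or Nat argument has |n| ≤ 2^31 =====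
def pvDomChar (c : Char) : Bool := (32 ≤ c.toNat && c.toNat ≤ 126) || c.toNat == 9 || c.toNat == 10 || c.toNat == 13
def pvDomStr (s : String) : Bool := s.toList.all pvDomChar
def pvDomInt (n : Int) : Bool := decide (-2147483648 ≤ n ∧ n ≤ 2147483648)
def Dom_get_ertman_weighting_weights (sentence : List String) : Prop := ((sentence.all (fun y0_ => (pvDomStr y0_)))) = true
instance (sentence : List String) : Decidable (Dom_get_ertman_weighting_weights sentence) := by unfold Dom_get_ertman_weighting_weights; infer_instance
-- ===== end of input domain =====

-- B builds the whole weight list at once as two slices of one padded descending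
-- ramp mirrored around the ambiguous word, instead of A's per-element distance
-- cascade (alternative decomposition; same O(n) cost).

-- ===== PORT A =====
-- helper get_uniform_weights
def pvUniform (sentence : List String) : List Int := List.replicate sentence.length 1

-- helper get_index_of_ambigious_word: for word in sentence with counter i
def pvAIdx : List String → Int → Int
  | [], _ => -1
  | w :: ws, i =>
    if PySem.Str.len w > 3 ∧ PySem.Str.pyGet? w 0 = some '.' ∧
       PySem.Str.pyGet? w 1 = some 'X' ∧ PySem.Str.pyGet? w 2 = some '-'
    then i else pvAIdx ws (i + 1)

def get_ertman_weighting_weights (sentence : List String) : List Int :=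
  let pos_ambigious := pvAIdx sentence 0
  if pos_ambigious = -1 then pvUniform sentence
  else
    (PySem.List.pyRange 0 (sentence.length : Int) 1).foldl (fun weightings i =>
      let dist : Int := |pos_ambigious - i|
      if dist = 0 then weightings ++ [0]
      else if dist = 1 then weightings ++ [11]
      else if dist = 2 then weightings ++ [10]
      else if dist = 3 then weightings ++ [8]
      else if dist = 4 then weightings ++ [5]
      else if dist = 5 then weightings ++ [1]
      else weightings ++ [1]) []

-- ===== PORT B =====
-- B's search loop: 'for i in range(n): … break' over the words, testing w[:3] == ".X-"
def pvBIdx : List String → Int → Int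
  | [], _ => -1
  | w :: ws, i =>
    if PySem.Str.len w > 3 ∧ PySem.Str.slice w none (some 3) = ".X-"
    then i else pvBIdx ws (i + 1)

def get_ertman_weighting_weights_alt (sentence : List String) : List Int :=
  let n : Int := sentence.length
  let pos := pvBIdx sentence 0
  if pos = -1 then List.replicate sentence.length 1
  else
    let ramp : List Int := [11, 10, 8, 5] ++ List.replicate sentence.length 1
    ((PySem.List.slice? (PySem.List.slice ramp none (some pos)) none none (-1)).getD [])
      ++ [0] ++ PySem.List.slice ramp none (some (n - 1 - pos))

-- ===== PRECONDITION & SPEC =====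
def Spec_get_ertman_weighting_weights (sentence : List String) (out : List Int) : Prop := out = get_ertman_weighting_weights_alt sentence
instance (sentence : List String) (out : List Int) : Decidable (Spec_get_ertman_weighting_weights sentence out) := by unfold Spec_get_ertman_weighting_weights; infer_instance

-- ===== CLAIM (what is proved, stated in full; the proofs are below) =====
def Claim_equal_get_ertman_weighting_weights : Prop := ∀ (sentence : List String), Dom_get_ertman_weighting_weights sentence → Spec_get_ertman_weighting_weights sentence (get_ertman_weighting_weights sentence)

-- ===== LEMMAS AND PROOFS =====

-- the cascade value as a function of the (natural) distance
def pvCasN (d : Nat) : Int :=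
  if d = 0 then 0 else if d = 1 then 11 else if d = 2 then 10
  else if d = 3 then 8 else if d = 4 then 5 else 1

-- A's word test (three char lookups) equals B's word test (a slice comparison), list side.
lemma pvCondList (l : List Char) :
    (l.take 3 = ['.', 'X', '-'] ∧ (3 : Int) < (l.length : Int)) ↔
    ((3 : Int) < (l.length : Int) ∧ PySem.List.pyGet? l 0 = some '.' ∧
     PySem.List.pyGet? l 1 = some 'X' ∧ PySem.List.pyGet? l 2 = some '-') := by
  rcases l with _ | ⟨a, _ | ⟨b, _ | ⟨c, rest⟩⟩⟩
  · simp [PySem.List.pyGet?, PySem.List.pyIdx?]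
  · simp [PySem.List.pyGet?, PySem.List.pyIdx?]
  · simp [PySem.List.pyGet?, PySem.List.pyIdx?]
  · simp only [PySem.List.pyGet?, PySem.List.pyIdx?]
    split_ifs <;>
      first
        | (simp; constructor <;> intro h <;> aesop)
        | omega

lemma pvCond_iff (w : String) :
    (PySem.Str.len w > 3 ∧ PySem.Str.slice w none (some 3) = ".X-") ↔
    (PySem.Str.len w > 3 ∧ PySem.Str.pyGet? w 0 = some '.' ∧
     PySem.Str.pyGet? w 1 = some 'X' ∧ PySem.Str.pyGet? w 2 = some '-') := by
  have hsl : PySem.Str.slice w none (some 3) = ".X-" ↔ w.toList.take 3 = ['.', 'X', '-'] := by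
    constructor
    · intro h
      have := congrArg String.toList h
      rwa [PySem.Str.toList_slice, PySem.Chars.slice_eq_listSlice,
        PySem.List.slice_to w.toList (by omega), (show ((3:Int)).toNat = 3 from rfl)] at this
    · intro h
      apply String.toList_injective
      rw [PySem.Str.toList_slice, PySem.Chars.slice_eq_listSlice,
        PySem.List.slice_to w.toList (by omega), (show ((3:Int)).toNat = 3 from rfl)]
      exact h
  simp only [PySem.Str.len_eq, PySem.Str.pyGet?_eq, PySem.Chars.pyGet?_eq_listPyGet?, hsl]
  constructor
  · intro ⟨h1, h2⟩; exact (pvCondList w.toList).mp ⟨h2, h1⟩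
  · intro h; exact ⟨h.1, ((pvCondList w.toList).mpr h).1⟩

-- the two index searches agree
lemma pvIdx_eq : ∀ (ws : List String) (k : Int), pvBIdx ws k = pvAIdx ws k
  | [], _ => rfl
  | w :: ws, k => by
    simp only [pvBIdx, pvAIdx, pvCond_iff w]
    split_ifs with h
    · rfl
    · exact pvIdx_eq ws (k + 1)

-- a successful search returns an index in [k, k + length)
lemma pvAIdx_bounds : ∀ (ws : List String) (k : Int), pvAIdx ws k ≠ -1 →
    k ≤ pvAIdx ws k ∧ pvAIdx ws k < k + ws.length
  | [], _, h => absurd rfl h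
  | w :: ws, k, h => by
    simp only [pvAIdx] at h ⊢
    split_ifs at h ⊢ with hc
    · refine ⟨le_refl k, ?_⟩
      simp only [List.length_cons]
      push_cast
      omega
    · obtain ⟨h1, h2⟩ := pvAIdx_bounds ws (k + 1) h
      refine ⟨by omega, ?_⟩
      simp at h2 ⊢
      omega

-- the ramp's j-th element is the cascade value at distance j + 1
lemma pvRamp_elem (m j : Nat) (hj : j < 4 + m) :
    (([11, 10, 8, 5] ++ List.replicate m (1 : Int)))[j]'(by simp; omega) = pvCasN (j + 1) := by
  rcases Nat.lt_or_ge j 4 with h4 | h4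
  · interval_cases j <;> rfl
  · rw [List.getElem_append_right (by simpa using h4)]
    simp only [List.length_cons, List.length_nil, List.getElem_replicate]
    unfold pvCasN
    rw [if_neg (by omega), if_neg (by omega), if_neg (by omega),
        if_neg (by omega), if_neg (by omega)]

-- the six-way cascade on |x| is pvCasN of the natural distance
lemma pvCas_abs (x : Int) (acc : List Int) :
    (let dist : Int := |x|
     if dist = 0 then acc ++ [0]
     else if dist = 1 then acc ++ [11]
     else if dist = 2 then acc ++ [10]
     else if dist = 3 then acc ++ [8]
     else if dist = 4 then acc ++ [5]
     else if dist = 5 then acc ++ [1]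
     else acc ++ [1]) = acc ++ [pvCasN x.natAbs] := by
  simp only [Int.abs_eq_natAbs]
  unfold pvCasN
  rcases Nat.lt_or_ge x.natAbs 6 with h | h
  · interval_cases h : x.natAbs <;> simp
  · rw [if_neg (by omega), if_neg (by omega), if_neg (by omega), if_neg (by omega),
        if_neg (by omega), if_neg (by omega), if_neg (by omega), if_neg (by omega),
        if_neg (by omega), if_neg (by omega), if_neg (by omega)]

-- the mirrored-slices construction equals the per-index cascade map
lemma pvTake_eq (n k : Nat) (hk : k ≤ 4 + n) :
    ([11, 10, 8, 5] ++ List.replicate n (1 : Int)).take k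
      = (List.range k).map (fun j => pvCasN (j + 1)) := by
  apply List.ext_getElem
  · simp
    omega
  · intro i hi hi'
    rw [List.getElem_take, List.getElem_map, List.getElem_range,
        pvRamp_elem n i (by simp at hi; omega)]

lemma pvMirror_eq (n p : Nat) (hp : p < n) :
    (List.range n).map (fun j : Nat => pvCasN ((p : Int) - (j : Int)).natAbs) =
    (([11, 10, 8, 5] ++ List.replicate n (1 : Int)).take p).reverse ++ [0]
      ++ ([11, 10, 8, 5] ++ List.replicate n (1 : Int)).take (n - 1 - p) := by
  rw [pvTake_eq n p (by omega), pvTake_eq n (n - 1 - p) (by omega)]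
  have hsplit : List.range n
      = (List.range p ++ [p]) ++ (List.range (n - 1 - p)).map (fun j => p + 1 + j) := by
    have hn : n = (p + 1) + (n - 1 - p) := by omega
    conv_lhs => rw [hn]
    rw [List.range_add, List.range_succ]
  rw [hsplit, List.map_append, List.map_append, List.map_map]
  have h1 : (List.range p).map (fun j : Nat => pvCasN ((p : Int) - (j : Int)).natAbs)
      = ((List.range p).map (fun j => pvCasN (j + 1))).reverse := by
    apply List.ext_getElem
    · simp
    · intro i hi hi'
      rw [List.getElem_map, List.getElem_range, List.getElem_reverse]
      simp only [List.length_map, List.length_range]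
      rw [List.getElem_map, List.getElem_range]
      congr 1
      simp only [List.length_map, List.length_range] at hi
      omega
  have h2 : ([p] : List Nat).map (fun j : Nat => pvCasN ((p : Int) - (j : Int)).natAbs)
      = [0] := by
    simp [pvCasN]
  have h3 : (List.range (n - 1 - p)).map
        ((fun j : Nat => pvCasN ((p : Int) - (j : Int)).natAbs) ∘ (fun j => p + 1 + j))
      = (List.range (n - 1 - p)).map (fun j => pvCasN (j + 1)) := by
    apply List.map_congr_left
    intro j _
    simp only [Function.comp]
    congr 1
    omega
  rw [h1, h2, h3]

-- ===== VERDICT (by name: the statement is the Claim_ definition above) =====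
theorem get_ertman_weighting_weights_spec : Claim_equal_get_ertman_weighting_weights := by
  intro sentence _
  unfold Spec_get_ertman_weighting_weights get_ertman_weighting_weights
    get_ertman_weighting_weights_alt
  rw [pvIdx_eq sentence 0]
  set pos := pvAIdx sentence 0 with hpos
  by_cases hneg : pos = -1
  · simp [hneg, pvUniform]
  · rw [if_neg hneg, if_neg hneg]
    have hb := pvAIdx_bounds sentence 0 hneg
    obtain ⟨hb1, hb2⟩ := hb
    set n := sentence.length with hn
    have hposnat : pos = ((pos.toNat : Nat) : Int) := by omega
    have hpn : pos.toNat < n := by omega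
    -- A's loop is a map of the cascade over the indices
    have hA : (PySem.List.pyRange 0 (n : Int) 1).foldl (fun weightings i =>
        let dist : Int := |pos - i|
        if dist = 0 then weightings ++ [0]
        else if dist = 1 then weightings ++ [11]
        else if dist = 2 then weightings ++ [10]
        else if dist = 3 then weightings ++ [8]
        else if dist = 4 then weightings ++ [5]
        else if dist = 5 then weightings ++ [1]
        else weightings ++ [1]) []
        = (List.range n).map (fun j : Nat => pvCasN (pos - (j : Int)).natAbs) := by
      calc _ = (PySem.List.pyRange 0 (n : Int) 1).foldl
            (fun acc i => acc ++ [pvCasN (pos - i).natAbs]) [] := by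
            apply PySem.List.foldl_congr_mem
            intro acc x _
            exact pvCas_abs (pos - x) acc
        _ = _ := by
            rw [PySem.List.foldl_append_singleton_eq_map, PySem.List.pyRange_zero_natCast,
              List.map_map]
            simp [Function.comp]
    rw [hA]
    -- B's slices
    simp only []
    rw [PySem.List.slice?_none_none_neg_one, Option.getD_some,
        PySem.List.slice_to _ (by omega), PySem.List.slice_to _ (by omega)]
    have h1 : ((n : Int) - 1 - pos).toNat = n - 1 - pos.toNat := by omega
    rw [h1]
    rw [hposnat]
    exact pvMirror_eq n pos.toNat hpn
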